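-- pv_equiv track=rewrite | github.com/elanzini/License-Plate-Detection | CaptureFrame_Process.py | merge_similar_plates
-- ===== SOURCE A (Python) =====
-- def hamming_distance(s1, s2):
--     return sum(c1 != c2 for c1, c2 in zip(s1, s2))
--
-- def merge_similar_plates(plates_dict, max_hamming_distance):
--
--     n = len(plates_dict)
--
--     plates = list(plates_dict.keys())
--
--     plates = sorted(plates, key=lambda plate: -plates_dict[plate])
--
--     plates_to_join = []
--
--     for i in range(n - 1):
--         for j in range(i + 1, n):
--
--             plate_i = plates[i]
--             plate_j = plates[j]
--
--             if hamming_distance(plate_i, plate_j) <= max_hamming_distance: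
--
--                 plates_to_join.append(plate_i)
--                 plates_to_join.append(plate_j)
--
--             if len(plates_to_join) > 0:
--                 break
--
--         if len(plates_to_join) > 0:
--             break
--
--     if len(plates_to_join) > 0:
--
--         new_plates_dict = plates_dict.copy()
--
--         if plates_dict[plates_to_join[0]] > plates_dict[plates_to_join[1]]:
--
--             del new_plates_dict[plates_to_join[0]]
--             del new_plates_dict[plates_to_join[1]]
--
--             new_plates_dict.update({
--                 plates_to_join[0]: plates_dict[plates_to_join[0]] + plates_dict[plates_to_join[1]]
--             })
--
--         else:
--
--             del new_plates_dict[plates_to_join[0]]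
--             del new_plates_dict[plates_to_join[1]]
--
--             new_plates_dict.update({
--                 plates_to_join[1]: plates_dict[plates_to_join[0]] + plates_dict[plates_to_join[1]]
--             })
--
--         return merge_similar_plates(new_plates_dict, max_hamming_distance)
--
--     else:
--
--         return plates_dict
-- ===== SOURCE B (Python) =====
-- def merge_similar_plates(plates_dict, max_hamming_distance):
--     # Iterative re-implementation: a while loop replaces A's tail recursion and the
--     # first matching pair is found with enumerate/next instead of break-flag index loops.
--     d = plates_dict
--     while True:
--         order = sorted(d, key=lambda k: -d[k])
--         pair = None
--         for idx, p in enumerate(order):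
--             q = next((q for q in order[idx + 1:]
--                       if sum(a != b for a, b in zip(p, q)) <= max_hamming_distance), None)
--             if q is not None:
--                 pair = (p, q)
--                 break
--         if pair is None:
--             return d
--         p, q = pair
--         total = d[p] + d[q]
--         keep = p if d[p] > d[q] else q
--         d2 = {k: v for k, v in d.items() if k != p and k != q}
--         d2[keep] = total
--         d = d2
-- ===== Notes on version B (the rewrite author's own statement) =====
-- stated objective: alternative
-- what changed: Tail recursion replaced by an iterative while loop; the break-flag nested index loops that build a plates_to_join list are replaced by an enumerate/next first-pair search returning an Option-like pair, and the copy/del/del/update dict rebuild is replaced by a single filtering comprehension plus one append.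
import Mathlib
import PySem

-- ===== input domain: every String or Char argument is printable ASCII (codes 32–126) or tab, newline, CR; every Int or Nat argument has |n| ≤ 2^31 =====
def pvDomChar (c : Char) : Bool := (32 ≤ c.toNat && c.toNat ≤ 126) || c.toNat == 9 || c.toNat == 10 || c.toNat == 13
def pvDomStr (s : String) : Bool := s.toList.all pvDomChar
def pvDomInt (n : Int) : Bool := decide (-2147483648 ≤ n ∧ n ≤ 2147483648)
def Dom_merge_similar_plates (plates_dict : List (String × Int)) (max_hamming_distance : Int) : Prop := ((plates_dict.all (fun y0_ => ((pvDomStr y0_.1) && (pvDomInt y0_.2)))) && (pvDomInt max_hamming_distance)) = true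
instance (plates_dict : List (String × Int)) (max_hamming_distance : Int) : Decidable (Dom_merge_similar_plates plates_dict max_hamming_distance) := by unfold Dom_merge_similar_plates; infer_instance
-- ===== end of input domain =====

-- B replaces A's tail recursion + break-flag nested index loops + copy/del/del/update dict
-- rebuild by a while loop, a structural first-pair search and one filtering pass; same cost,
-- proved equal on association lists without duplicate keys (the dict domain).

-- Shared dict/str primitives (Python built-ins used by both sources):
-- d[k] for a key known to be present (A and B only look up keys taken from d.keys()):
def pvGet (d : List (String × Int)) (k : String) : Int :=
  match d.find? (fun kv => kv.1 == k) with
  | some kv => kv.2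
  | none => 0
-- hamming_distance(s1, s2) = sum(c1 != c2 for c1, c2 in zip(s1, s2)), a module helper both use
def pvHam (s1 s2 : String) : Int :=
  ((s1.toList.zip s2.toList).map (fun c => if c.1 ≠ c.2 then (1 : Int) else 0)).sum

-- ===== PORT A =====
-- inner 'for j in range(i+1, n)' with its two 'if len(plates_to_join) > 0: break' checks
def mergeA_loopJ (plates : List String) (maxh : Int) (i : Int) (ptj : List String) :
    List Int → List String
  | [] => ptj
  | j :: js =>
    let plate_i := PySem.List.pyGetD plates i ""
    let plate_j := PySem.List.pyGetD plates j ""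
    let ptj' := if pvHam plate_i plate_j ≤ maxh then ptj ++ [plate_i, plate_j] else ptj
    if ptj'.length > 0 then ptj' else mergeA_loopJ plates maxh i ptj' js

-- outer 'for i in range(n - 1)' with its break
def mergeA_loopI (plates : List String) (maxh : Int) (n : Int) (ptj : List String) :
    List Int → List String
  | [] => ptj
  | i :: is' =>
    let ptj' := mergeA_loopJ plates maxh i ptj (PySem.List.pyRange (i + 1) n 1)
    if ptj'.length > 0 then ptj' else mergeA_loopI plates maxh n ptj' is'

-- the recursive function, with fuel as a totality guard only (each merge shrinks the dict,
-- so fuel = len(plates_dict) + 1 is never exhausted on dict inputs)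
def mergeA_go : Nat → List (String × Int) → Int → List (String × Int)
  | 0, d, _ => d
  | fuel + 1, d, maxh =>
    let n : Int := PySem.List.len d
    let plates := d.map Prod.fst
    let plates := PySem.List.sorted plates (fun plate => -(pvGet d plate)) false
    let ptj := mergeA_loopI plates maxh n [] (PySem.List.pyRange 0 (n - 1) 1)
    if ptj.length > 0 then
      let p0 := PySem.List.pyGetD ptj 0 ""
      let p1 := PySem.List.pyGetD ptj 1 ""
      -- new_plates_dict = plates_dict.copy(); del both keys; update appends the survivor
      -- (exact: the survivor key was just deleted, so dict.update appends it at the end)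
      if pvGet d p0 > pvGet d p1 then
        mergeA_go fuel
          (((d.eraseP (fun kv => kv.1 == p0)).eraseP (fun kv => kv.1 == p1)) ++
            [(p0, pvGet d p0 + pvGet d p1)]) maxh
      else
        mergeA_go fuel
          (((d.eraseP (fun kv => kv.1 == p0)).eraseP (fun kv => kv.1 == p1)) ++
            [(p1, pvGet d p0 + pvGet d p1)]) maxh
    else d

def merge_similar_plates (plates_dict : List (String × Int)) (max_hamming_distance : Int) :
    List (String × Int) :=
  mergeA_go (plates_dict.length + 1) plates_dict max_hamming_distance

-- ===== PORT B =====
-- 'for idx, p in enumerate(order): q = next((q for q in order[idx+1:] if …), None)':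
-- order[idx+1:] is exactly the tail of the structural recursion
def mergeB_find (maxh : Int) : List String → Option (String × String)
  | [] => none
  | p :: rest =>
    match rest.find? (fun q => pvHam p q ≤ maxh) with
    | some q => some (p, q)
    | none => mergeB_find maxh rest

-- the while loop, with the same fuel guard
def mergeB_go : Nat → List (String × Int) → Int → List (String × Int)
  | 0, d, _ => d
  | fuel + 1, d, maxh =>
    let order := PySem.List.sorted (d.map Prod.fst) (fun k => -(pvGet d k)) false
    match mergeB_find maxh order with
    | none => d
    | some (p, q) =>
      let total := pvGet d p + pvGet d q
      let keep := if pvGet d p > pvGet d q then p else q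
      -- d2 = {k: v for k, v in d.items() if k != p and k != q}; d2[keep] = total
      -- (exact: keep was filtered out, so the assignment appends)
      mergeB_go fuel ((d.filter (fun kv => !(kv.1 == p) && !(kv.1 == q))) ++ [(keep, total)]) maxh

def merge_similar_plates_alt (plates_dict : List (String × Int)) (max_hamming_distance : Int) :
    List (String × Int) :=
  mergeB_go (plates_dict.length + 1) plates_dict max_hamming_distance

-- ===== PRECONDITION & SPEC =====
-- Pre_ excludes association lists with duplicate keys: they never arise from a Python dict
-- (a dict literal collapses them — A and B agree on the collapsed dict), and on such raw lists
-- the two list-level renderings of 'del d[k]' (erase first) vs the comprehension (filter all)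
-- are both arbitrary.
def Pre_merge_similar_plates (plates_dict : List (String × Int)) (max_hamming_distance : Int) : Prop :=
  (plates_dict.map Prod.fst).Nodup
instance (plates_dict : List (String × Int)) (max_hamming_distance : Int) : Decidable (Pre_merge_similar_plates plates_dict max_hamming_distance) := by unfold Pre_merge_similar_plates; infer_instance

def pvWitness_merge_similar_plates : (List (String × Int)) × Int :=
  ([("AB1", 3), ("AB2", 2), ("XY9", 1)], 1)

def Spec_merge_similar_plates (plates_dict : List (String × Int)) (max_hamming_distance : Int) (out : List (String × Int)) : Prop := out = merge_similar_plates_alt plates_dict max_hamming_distance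
instance (plates_dict : List (String × Int)) (max_hamming_distance : Int) (out : List (String × Int)) : Decidable (Spec_merge_similar_plates plates_dict max_hamming_distance out) := by unfold Spec_merge_similar_plates; infer_instance

-- ===== CLAIM (what is proved, stated in full; the proofs are below) =====
def Claim_equal_merge_similar_plates : Prop := ∀ (plates_dict : List (String × Int)) (max_hamming_distance : Int), Dom_merge_similar_plates plates_dict max_hamming_distance → Pre_merge_similar_plates plates_dict max_hamming_distance → Spec_merge_similar_plates plates_dict max_hamming_distance (merge_similar_plates plates_dict max_hamming_distance)

-- ===== LEMMAS AND PROOFS =====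

theorem merge_witness_ok :
    Dom_merge_similar_plates pvWitness_merge_similar_plates.1 pvWitness_merge_similar_plates.2 ∧
    Pre_merge_similar_plates pvWitness_merge_similar_plates.1 pvWitness_merge_similar_plates.2 := by
  constructor <;> decide

-- inner loop ≡ find? over the tail
theorem loopJ_eq_find (plates : List String) (maxh : Int) (i : Nat) :
    ∀ j : Nat,
      mergeA_loopJ plates maxh (i : Int) [] (PySem.List.pyRange ((j : Int)) plates.length 1) =
        match (plates.drop j).find?
            (fun q => pvHam (plates.getD i "") q ≤ maxh) with
        | some q => [plates.getD i "", q]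
        | none => [] := by
  have key : ∀ (m j : Nat), plates.length ≤ j + m →
      mergeA_loopJ plates maxh (i : Int) [] (PySem.List.pyRange ((j : Int)) plates.length 1) =
        match (plates.drop j).find?
            (fun q => pvHam (plates.getD i "") q ≤ maxh) with
        | some q => [plates.getD i "", q]
        | none => [] := by
    intro m
    induction m with
    | zero =>
      intro j hj
      rw [PySem.List.pyRange_one]
      have h0 : ((plates.length : Int) - (j : Int)).toNat = 0 := by omega
      rw [h0]
      simp [mergeA_loopJ, List.drop_eq_nil_of_le (by omega : plates.length ≤ j)]
    | succ m ih =>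
      intro j hj
      by_cases hlt : j < plates.length
      · rw [PySem.List.pyRange_one_cons (by exact_mod_cast hlt)]
        have hdrop : plates.drop j = plates[j] :: plates.drop (j + 1) :=
          List.drop_eq_getElem_cons hlt
        have hgd : PySem.List.pyGetD plates ((j : Nat) : Int) "" = plates[j] := by
          rw [PySem.List.pyGetD_natCast]
          exact List.getD_eq_getElem _ _ hlt
        have hgi : PySem.List.pyGetD plates ((i : Nat) : Int) "" = plates.getD i "" :=
          PySem.List.pyGetD_natCast ..
        have hcast : ((j : Nat) : Int) + 1 = (((j + 1 : Nat) : Nat) : Int) := by push_cast; ring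
        simp only [mergeA_loopJ, hgd, hgi]
        rw [hdrop]
        by_cases hc : pvHam (plates.getD i "") plates[j] ≤ maxh
        · rw [if_pos hc]
          have hfind : (plates[j] :: plates.drop (j + 1)).find?
              (fun q => pvHam (plates.getD i "") q ≤ maxh) = some plates[j] := by
            have hcb : decide (pvHam (plates.getD i "") plates[j] ≤ maxh) = true :=
              decide_eq_true hc
            simp only [List.find?_cons, hcb]
          rw [hfind]
          simp
        · rw [if_neg hc]
          have hfind : (plates[j] :: plates.drop (j + 1)).find?
              (fun q => pvHam (plates.getD i "") q ≤ maxh)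
              = (plates.drop (j + 1)).find? (fun q => pvHam (plates.getD i "") q ≤ maxh) := by
            have hcb : decide (pvHam (plates.getD i "") plates[j] ≤ maxh) = false :=
              decide_eq_false hc
            simp only [List.find?_cons, hcb]
          rw [hfind]
          simp only [List.length_nil, gt_iff_lt, lt_self_iff_false, if_false]
          rw [hcast]
          exact ih (j + 1) (by omega)
      · rw [PySem.List.pyRange_one]
        have h0 : ((plates.length : Int) - (j : Int)).toNat = 0 := by omega
        rw [h0]
        simp [mergeA_loopJ, List.drop_eq_nil_of_le (by omega : plates.length ≤ j)]
  intro j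
  exact key plates.length j (by omega)

-- outer loop ≡ mergeB_find over the suffix
theorem loopI_eq_findPair (plates : List String) (maxh : Int) :
    ∀ a : Nat,
      mergeA_loopI plates maxh (plates.length : Int) []
          (PySem.List.pyRange ((a : Int)) ((plates.length : Int) - 1) 1) =
        match mergeB_find maxh (plates.drop a) with
        | some pq => [pq.1, pq.2]
        | none => [] := by
  have key : ∀ (m a : Nat), plates.length ≤ a + m →
      mergeA_loopI plates maxh (plates.length : Int) []
          (PySem.List.pyRange ((a : Int)) ((plates.length : Int) - 1) 1) =
        match mergeB_find maxh (plates.drop a) with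
        | some pq => [pq.1, pq.2]
        | none => [] := by
    intro m
    induction m with
    | zero =>
      intro a ha
      rw [PySem.List.pyRange_one]
      have h0 : ((plates.length : Int) - 1 - (a : Int)).toNat = 0 := by omega
      rw [h0]
      simp [mergeA_loopI, List.drop_eq_nil_of_le (by omega : plates.length ≤ a), mergeB_find]
    | succ m ih =>
      intro a ha
      by_cases hlt : a + 1 < plates.length
      · rw [PySem.List.pyRange_one_cons (by omega : ((a : Nat) : Int) < (plates.length : Int) - 1)]
        have hdrop : plates.drop a = plates[a] :: plates.drop (a + 1) :=
          List.drop_eq_getElem_cons (by omega)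
        have hgd : plates.getD a "" = plates[a] := List.getD_eq_getElem _ _ (by omega)
        have hcast : ((a : Nat) : Int) + 1 = (((a + 1 : Nat) : Nat) : Int) := by push_cast; ring
        simp only [mergeA_loopI]
        rw [hcast, loopJ_eq_find plates maxh a (a + 1), hgd, hdrop]
        simp only [mergeB_find]
        cases hf : (plates.drop (a + 1)).find? (fun q => pvHam plates[a] q ≤ maxh) with
        | some q => rfl
        | none =>
          simp only [List.length_nil, gt_iff_lt, lt_self_iff_false, if_false]
          exact ih (a + 1) (by omega)
      · -- range empty: a + 1 ≥ len, so drop a has at most one element and B finds no pair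
        rw [PySem.List.pyRange_one]
        have h0 : ((plates.length : Int) - 1 - (a : Int)).toNat = 0 := by omega
        rw [h0]
        simp only [List.range_zero, List.map_nil, mergeA_loopI]
        cases hD : plates.drop a with
        | nil => simp [mergeB_find]
        | cons x t =>
          have hlen : (plates.drop a).length = plates.length - a := List.length_drop ..
          have ht : t = [] := by
            rw [hD] at hlen
            simp only [List.length_cons] at hlen
            exact List.eq_nil_of_length_eq_zero (by omega)
          subst ht
          simp [mergeB_find]
  intro a
  exact key plates.length a (by omega)

-- a found pair consists of two distinct members of a nodup list
theorem mergeB_find_props (maxh : Int) :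
    ∀ (l : List String), l.Nodup → ∀ p q, mergeB_find maxh l = some (p, q) →
      p ∈ l ∧ q ∈ l ∧ p ≠ q := by
  intro l
  induction l with
  | nil => intro _ p q h; simp [mergeB_find] at h
  | cons x rest ih =>
    intro hnd p q h
    simp only [mergeB_find] at h
    cases hf : rest.find? (fun q => pvHam x q ≤ maxh) with
    | some q' =>
      rw [hf] at h
      simp only [Option.some.injEq, Prod.mk.injEq] at h
      have hqmem : q' ∈ rest := List.mem_of_find?_eq_some hf
      have hpx : x ∉ rest := (List.nodup_cons.mp hnd).1
      rw [← h.1, ← h.2]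
      exact ⟨List.mem_cons_self .., List.mem_cons_of_mem _ hqmem, fun he => hpx (he ▸ hqmem)⟩
    | none =>
      rw [hf] at h
      obtain ⟨h1, h2, h3⟩ := ih (List.nodup_cons.mp hnd).2 p q h
      exact ⟨List.mem_cons_of_mem _ h1, List.mem_cons_of_mem _ h2, h3⟩

-- erase-first equals filter-all when keys are unique
theorem eraseP_eq_filter_of_nodup (d : List (String × Int)) (p : String)
    (h : (d.map Prod.fst).Nodup) :
    d.eraseP (fun kv => kv.1 == p) = d.filter (fun kv => !(kv.1 == p)) := by
  induction d with
  | nil => rfl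
  | cons kv t ih =>
    simp only [List.map_cons, List.nodup_cons] at h
    by_cases hk : kv.1 = p
    · have hall : ∀ a ∈ t, (!(a.1 == p)) = true := by
        intro a ha
        have hmem : a.1 ∈ t.map Prod.fst := List.mem_map.mpr ⟨a, ha, rfl⟩
        simp only [Bool.not_eq_eq_eq_not, Bool.not_true, beq_eq_false_iff_ne]
        intro he
        exact h.1 (by rw [hk, ← he]; exact hmem)
      have hbeq : (kv.1 == p) = true := beq_iff_eq.mpr hk
      simp [hbeq, List.filter_eq_self.mpr hall]
    · have hbeq : (kv.1 == p) = false := beq_eq_false_iff_ne.mpr hk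
      simp [hbeq, ih h.2]

theorem erase2_eq_filter (d : List (String × Int)) (p q : String)
    (h : (d.map Prod.fst).Nodup) :
    (d.eraseP (fun kv => kv.1 == p)).eraseP (fun kv => kv.1 == q) =
      d.filter (fun kv => !(kv.1 == p) && !(kv.1 == q)) := by
  rw [eraseP_eq_filter_of_nodup d p h]
  have hsub : List.Sublist (d.filter (fun kv => !(kv.1 == p))) d := List.filter_sublist
  have h2 : ((d.filter (fun kv => !(kv.1 == p))).map Prod.fst).Nodup :=
    (hsub.map Prod.fst).nodup h
  rw [eraseP_eq_filter_of_nodup _ q h2, List.filter_filter]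
  exact List.filter_congr (fun kv _ => Bool.and_comm ..)

theorem nodup_step (d : List (String × Int)) (p q keep : String) (total : Int)
    (h : (d.map Prod.fst).Nodup) (hk : keep = p ∨ keep = q) :
    (((d.filter (fun kv => !(kv.1 == p) && !(kv.1 == q))) ++ [(keep, total)]).map Prod.fst).Nodup := by
  rw [List.map_append]
  apply List.Nodup.append
  · have hsub : List.Sublist (d.filter (fun kv => !(kv.1 == p) && !(kv.1 == q))) d := List.filter_sublist
    exact (hsub.map Prod.fst).nodup h
  · simp
  · intro x hx hx2
    simp only [List.map_cons, List.map_nil, List.mem_singleton] at hx2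
    subst hx2
    obtain ⟨kv, hkv, hfst⟩ := List.mem_map.mp hx
    have hprop := List.of_mem_filter hkv
    simp only [Bool.and_eq_true, Bool.not_eq_eq_eq_not, Bool.not_true, beq_eq_false_iff_ne] at hprop
    rcases hk with rfl | rfl
    · exact hprop.1 hfst
    · exact hprop.2 hfst

theorem go_eq (fuel : Nat) :
    ∀ (d : List (String × Int)) (maxh : Int), (d.map Prod.fst).Nodup →
      mergeA_go fuel d maxh = mergeB_go fuel d maxh := by
  induction fuel with
  | zero => intro d maxh _; rfl
  | succ fuel ih =>
    intro d maxh hn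
    simp only [mergeA_go, mergeB_go]
    have hplen : (PySem.List.sorted (d.map Prod.fst) (fun k => -(pvGet d k)) false).length
        = d.length := by
      rw [PySem.List.length_sorted, List.length_map]
    set plates := PySem.List.sorted (d.map Prod.fst) (fun k => -(pvGet d k)) false
    have hnp : plates.Nodup := ((PySem.List.sorted_perm ..).nodup_iff).mpr hn
    have hlen : PySem.List.len d = (plates.length : Int) := by
      rw [PySem.List.len_eq, hplen]
    rw [hlen]
    have hI := loopI_eq_findPair plates maxh 0
    simp only [Nat.cast_zero, List.drop_zero] at hI
    rw [hI]
    cases hf : mergeB_find maxh plates with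
    | none => simp
    | some pq =>
      obtain ⟨p, q⟩ := pq
      obtain ⟨hpmem, hqmem, hpq⟩ := mergeB_find_props maxh plates hnp p q hf
      simp only
      rw [if_pos (show ([p, q] : List String).length > 0 by simp)]
      have hg0 : PySem.List.pyGetD [p, q] 0 "" = p := PySem.List.pyGetD_zero_cons ..
      have hg1 : PySem.List.pyGetD [p, q] 1 "" = q := by
        simp [PySem.List.pyGetD, PySem.List.pyGet?, PySem.List.pyIdx?]
      rw [hg0, hg1]
      rw [erase2_eq_filter d p q hn]
      by_cases hc : pvGet d p > pvGet d q
      · simp only [hc, if_true]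
        exact ih _ maxh (nodup_step d p q p _ hn (Or.inl rfl))
      · simp only [hc, if_false]
        exact ih _ maxh (nodup_step d p q q _ hn (Or.inr rfl))

-- ===== VERDICT (by name: the statement is the Claim_ definition above) =====
theorem merge_similar_plates_spec : Claim_equal_merge_similar_plates := by
  intro d maxh _ hpre
  unfold Spec_merge_similar_plates merge_similar_plates merge_similar_plates_alt
  exact go_eq (d.length + 1) d maxh hpre
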